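-- pv_equiv track=rewrite | github.com/erinlkolp/charlottelang | charlotte.py | _is_complete_string
-- ===== SOURCE A (Python) =====
-- def _is_complete_string(expr: str) -> bool:
--     """Check if expr is a single complete string literal (not two strings joined by an op)."""
--     if len(expr) < 2:
--         return False
--     q = expr[0]
--     if q not in ('"', "'"):
--         return False
--     i = 1
--     while i < len(expr):
--         if expr[i] == '\\':
--             i += 2
--             continue
--         if expr[i] == q:
--             return i == len(expr) - 1
--         i += 1
--     return False
-- ===== SOURCE B (Python) =====
-- def _is_complete_string(expr: str) -> bool:
--     """Check if expr is a single complete string literal (not two strings joined by an op)."""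
--     if len(expr) < 2:
--         return False
--     q = expr[0]
--     if q not in ('"', "'"):
--         return False
--
--     def escaped(j):
--         # a char is escaped iff the run of backslashes immediately before it has odd length
--         k = j
--         while k > 0 and expr[k - 1] == '\\':
--             k -= 1
--         return (j - k) % 2 == 1
--
--     j = next((j for j in range(1, len(expr))
--               if expr[j] == q and not escaped(j)), -1)
--     return j == len(expr) - 1
-- ===== Notes on version B (the rewrite author's own statement) =====
-- stated objective: alternative
-- what changed: Replaces A's sequential escape-skipping scan with a declarative search: a helper decides whether a position is escaped by the parity of the backslash run right before it, and the result is whether the first unescaped occurrence of the quote after position 0 sits at the last index.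
import Mathlib
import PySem

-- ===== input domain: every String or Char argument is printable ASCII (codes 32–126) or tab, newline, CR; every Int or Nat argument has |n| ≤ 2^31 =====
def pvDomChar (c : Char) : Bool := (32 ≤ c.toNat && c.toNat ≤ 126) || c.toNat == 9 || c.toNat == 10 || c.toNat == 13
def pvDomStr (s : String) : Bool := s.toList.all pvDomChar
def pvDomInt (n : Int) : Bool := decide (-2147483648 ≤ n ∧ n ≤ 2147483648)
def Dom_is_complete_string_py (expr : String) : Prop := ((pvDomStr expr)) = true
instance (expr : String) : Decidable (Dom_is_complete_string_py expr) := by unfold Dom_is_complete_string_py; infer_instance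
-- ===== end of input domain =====

-- B replaces A's sequential escape-skipping scan by a backslash-run-parity test of "escaped"
-- plus a search for the first unescaped quote; objective: alternative (same result, different algorithm).

-- ===== PORT A =====
-- A's while loop over the index i, with the two-step jump after a backslash.
def pvLoopA (cs : List Char) (q : Char) (i : Nat) : Bool :=
  if h : i < cs.length then
    if cs[i] = '\\' then pvLoopA cs q (i + 2)
    else if cs[i] = q then decide (i = cs.length - 1)
    else pvLoopA cs q (i + 1)
  else false
termination_by cs.length - i

def is_complete_string_py (expr : String) : Bool :=
  let cs := expr.toList
  if cs.length < 2 then false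
  else
    match cs with
    | [] => false
    | q :: _ =>
      if ¬ (q = '"' ∨ q = '\'') then false
      else pvLoopA cs q 1

-- ===== PORT B =====
-- B's helper: while k > 0 and expr[k-1] == '\\': k -= 1
def pvRunBack (cs : List Char) : Nat → Nat
  | 0 => 0
  | k + 1 => if cs.getD k ' ' = '\\' then pvRunBack cs k else k + 1

-- B's escaped(j): the backslash run immediately before j has odd length
def pvEscaped (cs : List Char) (j : Nat) : Bool := decide ((j - pvRunBack cs j) % 2 = 1)

-- B's next(...): first j in range(1, len) with expr[j] == q and not escaped(j)
def pvFind (cs : List Char) (q : Char) : Option Nat :=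
  (List.range' 1 (cs.length - 1)).find? (fun j => cs.getD j ' ' == q && !pvEscaped cs j)

def is_complete_string_py_alt (expr : String) : Bool :=
  let cs := expr.toList
  if cs.length < 2 then false
  else
    match cs with
    | [] => false
    | q :: _ =>
      if q = '"' ∨ q = '\'' then
        let j : Int := (pvFind cs q).elim (-1) (fun j => (j : Int))
        j == (cs.length : Int) - 1
      else false

-- ===== PRECONDITION & SPEC =====
def Spec_is_complete_string_py (expr : String) (out : Bool) : Prop := out = is_complete_string_py_alt expr
instance (expr : String) (out : Bool) : Decidable (Spec_is_complete_string_py expr out) := by unfold Spec_is_complete_string_py; infer_instance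

-- ===== CLAIM (what is proved, stated in full; the proofs are below) =====
def Claim_equal_is_complete_string_py : Prop := ∀ (expr : String), Dom_is_complete_string_py expr → Spec_is_complete_string_py expr (is_complete_string_py expr)

-- ===== LEMMAS AND PROOFS =====

lemma pvRunBack_le (cs : List Char) : ∀ k, pvRunBack cs k ≤ k := by
  intro k
  induction k with
  | zero => simp [pvRunBack]
  | succ k ih => simp only [pvRunBack]; split <;> omega

lemma pvRunBack_bs (cs : List Char) (k : Nat) (h : cs.getD k ' ' = '\\') :
    pvRunBack cs (k + 1) = pvRunBack cs k := by
  rw [show pvRunBack cs (k + 1)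
      = if cs.getD k ' ' = '\\' then pvRunBack cs k else k + 1 from rfl, if_pos h]

lemma pvRunBack_nonbs (cs : List Char) (k : Nat) (h : cs.getD k ' ' ≠ '\\') :
    pvRunBack cs (k + 1) = k + 1 := by
  rw [show pvRunBack cs (k + 1)
      = if cs.getD k ' ' = '\\' then pvRunBack cs k else k + 1 from rfl, if_neg h]

-- the scan equals the search, from any unescaped starting position
lemma pvLoop_eq_find (cs : List Char) (q : Char) (hq : q ≠ '\\') : ∀ i : Nat,
    pvEscaped cs i = false →
    pvLoopA cs q i =
      ((List.range' i (cs.length - i)).find?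
        (fun j => cs.getD j ' ' == q && !pvEscaped cs j)).elim false
        (fun j => decide (j = cs.length - 1)) := by
  intro i
  induction hn : cs.length - i using Nat.strong_induction_on generalizing i with
  | _ n ih =>
  intro hesc
  subst hn
  by_cases h : i < cs.length
  · have hr1 : List.range' i (cs.length - i) = i :: List.range' (i + 1) (cs.length - (i + 1)) := by
      rw [show cs.length - i = (cs.length - (i + 1)) + 1 by omega]
      rfl
    have hrle := pvRunBack_le cs i
    have hpar : (i - pvRunBack cs i) % 2 = 0 := by
      have := of_decide_eq_false hesc
      omega
    by_cases hb : cs[i] = '\\'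
    · have hgd : cs.getD i ' ' = '\\' := by rw [List.getD_eq_getElem _ _ h]; exact hb
      have hpi : (cs.getD i ' ' == q && !pvEscaped cs i) = false := by
        rw [hgd]
        simp [Ne.symm hq]
      have hesc1 : pvEscaped cs (i + 1) = true := by
        unfold pvEscaped
        rw [pvRunBack_bs cs i hgd]
        exact decide_eq_true (by omega)
      have hesc2 : pvEscaped cs (i + 2) = false := by
        unfold pvEscaped
        by_cases hb2 : cs.getD (i + 1) ' ' = '\\'
        · rw [pvRunBack_bs cs (i + 1) hb2, pvRunBack_bs cs i hgd]
          exact decide_eq_false (by omega)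
        · rw [pvRunBack_nonbs cs (i + 1) hb2]
          exact decide_eq_false (by omega)
      have hstep : ((List.range' (i + 1) (cs.length - (i + 1))).find?
          (fun j => cs.getD j ' ' == q && !pvEscaped cs j)) =
          ((List.range' (i + 2) (cs.length - (i + 2))).find?
          (fun j => cs.getD j ' ' == q && !pvEscaped cs j)) := by
        by_cases h1 : i + 1 < cs.length
        · rw [show cs.length - (i + 1) = (cs.length - (i + 2)) + 1 by omega,
            show List.range' (i+1) ((cs.length - (i + 2)) + 1) = (i+1) :: List.range' (i+2) (cs.length - (i+2)) from rfl,
            List.find?_cons_of_neg (by simp [hesc1])]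
        · rw [show cs.length - (i + 1) = 0 by omega, show cs.length - (i + 2) = 0 by omega]
          rfl
      rw [pvLoopA]
      simp only [h, dif_pos, hb, if_pos]
      rw [hr1, List.find?_cons_of_neg (by rw [hpi]; simp), hstep]
      exact ih (cs.length - (i + 2)) (by omega) (i + 2) rfl hesc2
    · have hgd : cs.getD i ' ' = cs[i] := List.getD_eq_getElem _ _ h
      rw [pvLoopA]
      simp only [h, dif_pos, hb, if_false]
      by_cases hqi : cs[i] = q
      · rw [if_pos hqi, hr1, List.find?_cons_of_pos (by rw [hgd, hqi, hesc]; simp)]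
        simp [Option.elim]
      · rw [if_neg hqi, hr1, List.find?_cons_of_neg (by rw [hgd]; simp [hqi])]
        have hesc1 : pvEscaped cs (i + 1) = false := by
          unfold pvEscaped
          rw [pvRunBack_nonbs cs i (by rw [hgd]; exact hb)]
          exact decide_eq_false (by omega)
        exact ih (cs.length - (i + 1)) (by omega) (i + 1) rfl hesc1
  · rw [pvLoopA]
    simp only [h, dif_neg, not_false_iff]
    rw [show cs.length - i = 0 by omega]
    simp [Option.elim]

theorem is_complete_string_py_eq (expr : String) :
    is_complete_string_py expr = is_complete_string_py_alt expr := by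
  cases hcs : expr.toList with
  | nil =>
    have hA : is_complete_string_py expr = false := by
      unfold is_complete_string_py; rw [hcs]; rfl
    have hB : is_complete_string_py_alt expr = false := by
      unfold is_complete_string_py_alt; rw [hcs]; rfl
    rw [hA, hB]
  | cons q rest =>
    have hA : is_complete_string_py expr =
        (if (q :: rest).length < 2 then false
         else if ¬ (q = '"' ∨ q = '\'') then false else pvLoopA (q :: rest) q 1) := by
      unfold is_complete_string_py; rw [hcs]
    have hB : is_complete_string_py_alt expr =
        (if (q :: rest).length < 2 then false
         else if q = '"' ∨ q = '\'' then
           (((pvFind (q :: rest) q).elim (-1 : Int) (fun j => (j : Int))) ==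
             ((q :: rest).length : Int) - 1)
         else false) := by
      unfold is_complete_string_py_alt; rw [hcs]
    rw [hA, hB]
    by_cases hlen : (q :: rest).length < 2
    · rw [if_pos hlen, if_pos hlen]
    · rw [if_neg hlen, if_neg hlen]
      by_cases hq : q = '"' ∨ q = '\''
      · rw [if_neg (not_not_intro hq), if_pos hq]
        have hqbs : q ≠ '\\' := by rcases hq with h | h <;> simp [h]
        have hesc1 : pvEscaped (q :: rest) 1 = false := by
          unfold pvEscaped
          rw [pvRunBack_nonbs (q :: rest) 0 (by simpa using hqbs)]
          simp
        rw [pvLoop_eq_find (q :: rest) q hqbs 1 hesc1]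
        cases hf : pvFind (q :: rest) q with
        | none =>
          unfold pvFind at hf
          rw [hf]
          simp [Option.elim]
        | some j =>
          unfold pvFind at hf
          rw [hf]
          simp only [Option.elim]
          rw [Bool.eq_iff_iff]
          simp only [decide_eq_true_eq, beq_iff_eq]
          omega
      · rw [if_pos (by exact hq), if_neg hq]

-- ===== VERDICT (by name: the statement is the Claim_ definition above) =====
theorem is_complete_string_py_spec : Claim_equal_is_complete_string_py := by
  intro expr _
  exact is_complete_string_py_eq expr
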